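-- pv_equiv track=rewrite | github.com/kingpanther13/Hubitat-local-MCP-server | tests/sandbox_lint.py | _consume_gstring_interpolation
-- ===== SOURCE A (Python) =====
-- def _consume_gstring_interpolation(text: str, start: int) -> tuple[str, int]:
--     """Walk from `start` (index of `$` in `${`) to the matching `}`, returning
--     (preserved_text, index_past_close).
--
--     The body is preserved verbatim so downstream regex rules scan the Groovy
--     expression, except that nested string literals inside the body have their
--     contents blanked (so a `}` inside `"literal }"` doesn't close the
--     interpolation early, and a stray `getClass()` inside a nested literal
--     doesn't trigger a false positive).
--
--     Assumes `text[start] == '$'` and `text[start+1] == '{'`.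
--     """
--     out = ["  "]  # ${
--     depth = 1
--     k = start + 2
--     n = len(text)
--     while k < n and depth > 0:
--         ch = text[k]
--         if ch == "{":
--             depth += 1
--             out.append(ch)
--             k += 1
--         elif ch == "}":
--             depth -= 1
--             if depth == 0:
--                 out.append(" ")  # closing }
--                 k += 1
--                 break
--             out.append(ch)
--             k += 1
--         elif ch == '"' or ch == "'":
--             # Nested string literal inside the interpolation body. Skip past
--             # its contents (respecting escapes) so embedded `}` characters
--             # don't decrement our depth counter and stray sandbox-forbidden
--             # names inside literal text don't trigger false positives.
--             out.append(" ")
--             k += 1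
--             while k < n:
--                 if text[k] == "\\" and k + 1 < n:
--                     out.append("  ")
--                     k += 2
--                 elif text[k] == ch:
--                     out.append(" ")
--                     k += 1
--                     break
--                 else:
--                     out.append(" ")
--                     k += 1
--         elif ch == "\\" and k + 1 < n:
--             out.append(str(text[k]) + str(text[k + 1]))
--             k += 2
--         else:
--             out.append(ch)
--             k += 1
--     return "".join(out), k
-- ===== SOURCE B (Python) =====
-- def _consume_gstring_interpolation(text: str, start: int) -> tuple[str, int]:
--     """Two staged passes: pass 1 classifies each consumed position as kept or
--     blanked (flat state machine carrying the active quote char), pass 2 renders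
--     the result by reading the kept positions back out of `text`."""
--     n = len(text)
--     keep = [False, False]  # the '${' opener is blanked
--     depth = 1
--     k = start + 2
--     in_str = None
--     while k < n:
--         ch = text[k]
--         if in_str is not None:
--             if ch == "\\" and k + 1 < n:
--                 keep.append(False)
--                 keep.append(False)
--                 k += 2
--             else:
--                 keep.append(False)
--                 k += 1
--                 if ch == in_str:
--                     in_str = None
--         elif ch == "{":
--             depth += 1
--             keep.append(True)
--             k += 1
--         elif ch == "}":
--             depth -= 1
--             k += 1
--             if depth == 0:
--                 keep.append(False)
--                 break
--             keep.append(True)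
--         elif ch == '"' or ch == "'":
--             in_str = ch
--             keep.append(False)
--             k += 1
--         elif ch == "\\" and k + 1 < n:
--             keep.append(True)
--             keep.append(True)
--             k += 2
--         else:
--             keep.append(True)
--             k += 1
--     body = "".join(text[p] if f else " " for p, f in zip(range(start, k), keep))
--     return body, k
-- ===== Notes on version B (the rewrite author's own statement) =====
-- stated objective: alternative
-- what changed: B splits the work into two staged passes: pass 1 is one flat state machine (active quote char as state) that only classifies each consumed position as kept or blanked into a Bool mask, and pass 2 renders the output by reading the kept positions back out of the text, instead of A's nested loops that build the output string piecewise.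
import Mathlib
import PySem

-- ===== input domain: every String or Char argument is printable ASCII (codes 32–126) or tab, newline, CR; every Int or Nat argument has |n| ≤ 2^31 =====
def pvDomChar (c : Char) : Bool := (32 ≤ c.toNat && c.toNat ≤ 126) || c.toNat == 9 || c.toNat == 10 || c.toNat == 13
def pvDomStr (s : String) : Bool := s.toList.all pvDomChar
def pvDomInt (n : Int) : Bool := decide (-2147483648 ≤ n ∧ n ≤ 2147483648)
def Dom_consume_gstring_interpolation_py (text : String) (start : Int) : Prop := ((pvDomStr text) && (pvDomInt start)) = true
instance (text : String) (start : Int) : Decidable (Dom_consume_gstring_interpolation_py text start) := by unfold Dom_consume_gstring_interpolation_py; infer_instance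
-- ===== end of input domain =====

-- B re-implements the scan in two staged passes: pass 1 only CLASSIFIES each consumed
-- position as kept/blanked (one flat state machine, a List Bool mask), pass 2 renders the
-- output by reading the kept positions back out of the text (objective: alternative
-- decomposition; A builds the output string piecewise inside two nested loops).
-- Fuel (a Nat bounding the remaining iterations; each step advances k by ≥ 1, so the
-- initial fuel (n - k).toNat + 1 is never exhausted) makes each loop total in Lean.

-- ===== PORT A =====
-- inner 'while k < n' loop that blanks a nested string literal opened by quote q
def pvAStr (cs : List Char) (n : Int) (q : Char) : Nat → List String → Int → List String × Int
  | 0, out, k => (out, k)  -- fuel exhausted: unreachable from a sufficient initial fuel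
  | fuel + 1, out, k =>
    if k < n then
      match PySem.List.pyGet? cs k with
      | none => (out, k)  -- Python raises IndexError here (outside Pre_)
      | some c =>
        if c = '\\' ∧ k + 1 < n then pvAStr cs n q fuel (out ++ ["  "]) (k + 2)
        else if c = q then (out ++ [" "], k + 1)
        else pvAStr cs n q fuel (out ++ [" "]) (k + 1)
    else (out, k)

-- outer 'while k < n and depth > 0' loop of A
def pvALoop (cs : List Char) (n : Int) : Nat → Int → List String → Int → List String × Int
  | 0, _, out, k => (out, k)  -- fuel exhausted: unreachable from a sufficient initial fuel
  | fuel + 1, depth, out, k =>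
    if k < n ∧ 0 < depth then
      match PySem.List.pyGet? cs k with
      | none => (out, k)  -- Python raises IndexError here (outside Pre_)
      | some ch =>
        if ch = '{' then pvALoop cs n fuel (depth + 1) (out ++ [String.ofList [ch]]) (k + 1)
        else if ch = '}' then
          if depth - 1 = 0 then (out ++ [" "], k + 1)
          else pvALoop cs n fuel (depth - 1) (out ++ [String.ofList [ch]]) (k + 1)
        else if ch = '"' ∨ ch = '\'' then
          let r := pvAStr cs n ch fuel (out ++ [" "]) (k + 1)
          pvALoop cs n fuel depth r.1 r.2
        else if ch = '\\' ∧ k + 1 < n then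
          match PySem.List.pyGet? cs (k + 1) with
          | none => (out, k)  -- unreachable: k+1 is in range whenever k is and k+1 < n
          | some c2 => pvALoop cs n fuel depth (out ++ [String.ofList [ch, c2]]) (k + 2)
        else pvALoop cs n fuel depth (out ++ [String.ofList [ch]]) (k + 1)
    else (out, k)

def consume_gstring_interpolation_py (text : String) (start : Int) : String × Int :=
  -- out = ["  "]; depth = 1; k = start + 2; n = len(text); the two while-loops are pvALoop/pvAStr
  (PySem.Str.join "" (pvALoop text.toList (text.toList.length : Int)
      (((text.toList.length : Int) - (start + 2)).toNat + 1) 1 ["  "] (start + 2)).1,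
   (pvALoop text.toList (text.toList.length : Int)
      (((text.toList.length : Int) - (start + 2)).toNat + 1) 1 ["  "] (start + 2)).2)

-- ===== PORT B =====
-- pass 1: one flat 'while k < n' loop building the kept/blanked mask `keep` (one Bool per
-- consumed position); instr = the active quote char while inside a nested literal
def pvBMask (cs : List Char) (n : Int) : Nat → Option Char → Int → List Bool → Int → List Bool × Int
  | 0, _, _, keep, k => (keep, k)  -- fuel exhausted: unreachable from a sufficient initial fuel
  | fuel + 1, instr, depth, keep, k =>
    if k < n then
      match PySem.List.pyGet? cs k with
      | none => (keep, k)  -- Python raises IndexError here (outside Pre_)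
      | some ch =>
        match instr with
        | some q =>
          if ch = '\\' ∧ k + 1 < n then pvBMask cs n fuel (some q) depth (keep ++ [false, false]) (k + 2)
          else pvBMask cs n fuel (if ch = q then none else some q) depth (keep ++ [false]) (k + 1)
        | none =>
          if ch = '{' then pvBMask cs n fuel none (depth + 1) (keep ++ [true]) (k + 1)
          else if ch = '}' then
            if depth - 1 = 0 then (keep ++ [false], k + 1)
            else pvBMask cs n fuel none (depth - 1) (keep ++ [true]) (k + 1)
          else if ch = '"' ∨ ch = '\'' then pvBMask cs n fuel (some ch) depth (keep ++ [false]) (k + 1)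
          else if ch = '\\' ∧ k + 1 < n then pvBMask cs n fuel none depth (keep ++ [true, true]) (k + 2)
          else pvBMask cs n fuel none depth (keep ++ [true]) (k + 1)
    else (keep, k)

def consume_gstring_interpolation_py_alt (text : String) (start : Int) : String × Int :=
  -- keep = [False, False]; depth = 1; k = start + 2; in_str = None; then the join over
  -- zip(range(start, k), keep): text[p] if kept (only read at positions pass 1 consumed), ' ' if blanked
  let cs := text.toList
  let r := pvBMask cs (cs.length : Int) (((cs.length : Int) - (start + 2)).toNat + 1)
             none 1 [false, false] (start + 2)
  (PySem.Str.join "" (List.zipWith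
      (fun p f => if f then String.ofList [PySem.List.pyGetD cs p ' '] else " ")
      (PySem.List.pyRange start r.2 1) r.1),
   r.2)

-- ===== PRECONDITION & SPEC =====
-- Pre_ excludes exactly the inputs where the Python A raises IndexError
-- (start + 2 below -len(text): text[k] is out of range even for Python's negative indexing).
def Pre_consume_gstring_interpolation_py (text : String) (start : Int) : Prop :=
  -(text.toList.length : Int) ≤ start + 2
instance (text : String) (start : Int) : Decidable (Pre_consume_gstring_interpolation_py text start) := by
  unfold Pre_consume_gstring_interpolation_py; infer_instance

def pvWitness_consume_gstring_interpolation_py : String × Int := ("${x}", 0)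

def Spec_consume_gstring_interpolation_py (text : String) (start : Int) (out : String × Int) : Prop := out = consume_gstring_interpolation_py_alt text start
instance (text : String) (start : Int) (out : String × Int) : Decidable (Spec_consume_gstring_interpolation_py text start out) := by unfold Spec_consume_gstring_interpolation_py; infer_instance

-- ===== CLAIM (what is proved, stated in full; the proofs are below) =====
def Claim_equal_consume_gstring_interpolation_py : Prop := ∀ (text : String) (start : Int), Dom_consume_gstring_interpolation_py text start → Pre_consume_gstring_interpolation_py text start → Spec_consume_gstring_interpolation_py text start (consume_gstring_interpolation_py text start)

-- ===== LEMMAS AND PROOFS =====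

-- flatten of the pieces a Python ''.join receives (proof-side view of the output strings)
def pvJC (l : List String) : List Char := (l.map String.toList).flatten

-- proof-side renderer: the characters pass 2 produces for a mask starting at position k
def pvRen (cs : List Char) : Int → List Bool → List Char
  | _, [] => []
  | k, f :: m => (if f then PySem.List.pyGetD cs k ' ' else ' ') :: pvRen cs (k + 1) m

theorem pvJC_append (l1 l2 : List String) : pvJC (l1 ++ l2) = pvJC l1 ++ pvJC l2 := by
  simp [pvJC]

theorem pvRen_append (cs : List Char) (m1 m2 : List Bool) : ∀ k : Int,
    pvRen cs k (m1 ++ m2) = pvRen cs k m1 ++ pvRen cs (k + m1.length) m2 := by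
  induction m1 with
  | nil => intro k; simp [pvRen]
  | cons f m ih => intro k; simp [pvRen, ih (k + 1)]; ring_nf
  -- (ring_nf only fixes the k + 1 + m.length association)

theorem pvRen_replicate_false (cs : List Char) : ∀ (m : Nat) (k : Int),
    pvRen cs k (List.replicate m false) = List.replicate m ' ' := by
  intro m
  induction m with
  | zero => intro k; simp [pvRen]
  | succ m ih => intro k; simp [List.replicate_succ, pvRen, ih]

theorem pvRep_two {α : Type} (m : Nat) (a : α) : List.replicate (m + 2) a = a :: a :: List.replicate m a := by
  rw [show m + 2 = (m + 1) + 1 from rfl, List.replicate_succ, List.replicate_succ]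

theorem pvGetD_of_pyGet? (xs : List Char) (i : Int) (c d : Char)
    (h : PySem.List.pyGet? xs i = some c) : PySem.List.pyGetD xs i d = c := by
  have e : PySem.List.pyGetD xs i d = (PySem.List.pyGet? xs i).getD d := rfl
  rw [e, h]; rfl

-- intercalate with an empty separator is flatten (used to read ''.join through pvJC)
theorem pvIntercalate_nil (ls : List (List Char)) : List.intercalate [] ls = ls.flatten := by
  induction ls with
  | nil => rfl
  | cons h t ih =>
    cases t with
    | nil => simp [List.intercalate]
    | cons b u =>
      simp only [List.intercalate, List.intersperse] at *
      simp_all [List.flatten]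

theorem pvJoin_toList (l : List String) : (PySem.Str.join "" l).toList = pvJC l := by
  simp only [PySem.Str.toList_join, String.toList_empty]
  exact pvIntercalate_nil _

-- A's inner loop: the index never moves backwards
theorem pvAStr_le (cs : List Char) (n : Int) (q : Char) :
    ∀ (fuel : Nat) (out : List String) (k : Int), k ≤ (pvAStr cs n q fuel out k).2 := by
  intro fuel
  induction fuel with
  | zero => intro out k; simp [pvAStr]
  | succ fuel ih =>
    intro out k
    rw [pvAStr]
    by_cases hk : k < n
    · rw [if_pos hk]
      cases hg : PySem.List.pyGet? cs k with
      | none => simp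
      | some c =>
        dsimp only
        by_cases he : c = '\\' ∧ k + 1 < n
        · rw [if_pos he]; have := ih (out ++ ["  "]) (k + 2); omega
        · rw [if_neg he]
          by_cases hq : c = q
          · rw [if_pos hq]; simp
          · rw [if_neg hq]; have := ih (out ++ [" "]) (k + 1); omega
    · rw [if_neg hk]

-- A's inner loop: peeling the accumulator
theorem pvAStr_acc (cs : List Char) (n : Int) (q : Char) :
    ∀ (fuel : Nat) (out : List String) (k : Int),
      pvAStr cs n q fuel out k
        = (out ++ (pvAStr cs n q fuel [] k).1, (pvAStr cs n q fuel [] k).2) := by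
  intro fuel
  induction fuel with
  | zero => intro out k; simp [pvAStr]
  | succ fuel ih =>
    intro out k
    rw [pvAStr]
    conv_rhs => rw [pvAStr]
    by_cases hk : k < n
    · rw [if_pos hk, if_pos hk]
      cases hg : PySem.List.pyGet? cs k with
      | none => simp
      | some c =>
        dsimp only
        by_cases he : c = '\\' ∧ k + 1 < n
        · rw [if_pos he, if_pos he, ih (out ++ ["  "]) (k + 2), ih ([] ++ ["  "]) (k + 2)]
          simp
        · rw [if_neg he, if_neg he]
          by_cases hq : c = q
          · rw [if_pos hq, if_pos hq]; simp
          · rw [if_neg hq, if_neg hq, ih (out ++ [" "]) (k + 1), ih ([] ++ [" "]) (k + 1)]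
            simp
    · rw [if_neg hk, if_neg hk]; simp

-- A's inner loop only appends blanks: 1 space per consumed position
theorem pvAStr_blanks (cs : List Char) (n : Int) (q : Char) :
    ∀ (fuel : Nat) (out : List String) (k : Int),
      pvJC (pvAStr cs n q fuel out k).1
        = pvJC out ++ List.replicate ((pvAStr cs n q fuel out k).2 - k).toNat ' ' := by
  intro fuel
  induction fuel with
  | zero => intro out k; simp [pvAStr]
  | succ fuel ih =>
    intro out k
    rw [pvAStr]
    by_cases hk : k < n
    · rw [if_pos hk]
      cases hg : PySem.List.pyGet? cs k with
      | none => simp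
      | some c =>
        dsimp only
        by_cases he : c = '\\' ∧ k + 1 < n
        · rw [if_pos he, ih (out ++ ["  "]) (k + 2)]
          have hle := pvAStr_le cs n q fuel (out ++ ["  "]) (k + 2)
          rw [pvJC_append]
          have hn : ((pvAStr cs n q fuel (out ++ ["  "]) (k + 2)).2 - k).toNat
              = ((pvAStr cs n q fuel (out ++ ["  "]) (k + 2)).2 - (k + 2)).toNat + 2 := by omega
          rw [hn, pvRep_two]
          simp [pvJC]
        · rw [if_neg he]
          by_cases hq : c = q
          · rw [if_pos hq]
            rw [pvJC_append]
            simp [pvJC]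
          · rw [if_neg hq, ih (out ++ [" "]) (k + 1)]
            have hle := pvAStr_le cs n q fuel (out ++ [" "]) (k + 1)
            rw [pvJC_append]
            have hn : ((pvAStr cs n q fuel (out ++ [" "]) (k + 1)).2 - k).toNat
                = ((pvAStr cs n q fuel (out ++ [" "]) (k + 1)).2 - (k + 1)).toNat + 1 := by omega
            rw [hn, List.replicate_succ]
            simp [pvJC]
    · rw [if_neg hk]; simp

-- B's mask loop: any two sufficient fuels agree
theorem pvBMask_fuel (cs : List Char) (n : Int) :
    ∀ (f g : Nat) (instr : Option Char) (depth : Int) (keep : List Bool) (k : Int),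
      (n - k).toNat < f → (n - k).toNat < g →
      pvBMask cs n f instr depth keep k = pvBMask cs n g instr depth keep k := by
  intro f
  induction f with
  | zero => omega
  | succ f ih =>
    intro g instr depth keep k hf hg
    obtain ⟨g, rfl⟩ : ∃ g', g = g' + 1 := ⟨g - 1, by omega⟩
    rw [pvBMask, pvBMask]
    by_cases hk : k < n
    · rw [if_pos hk, if_pos hk]
      cases PySem.List.pyGet? cs k with
      | none => rfl
      | some ch =>
        dsimp only
        cases instr with
        | some q =>
          dsimp only
          by_cases he : ch = '\\' ∧ k + 1 < n
          · rw [if_pos he, if_pos he]; exact ih g _ depth _ (k + 2) (by omega) (by omega)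
          · rw [if_neg he, if_neg he]; exact ih g _ depth _ (k + 1) (by omega) (by omega)
        | none =>
          dsimp only
          by_cases h1 : ch = '{'
          · rw [if_pos h1, if_pos h1]; exact ih g none (depth + 1) _ (k + 1) (by omega) (by omega)
          · rw [if_neg h1, if_neg h1]
            by_cases h2 : ch = '}'
            · rw [if_pos h2, if_pos h2]
              by_cases h3 : depth - 1 = 0
              · rw [if_pos h3, if_pos h3]
              · rw [if_neg h3, if_neg h3]; exact ih g none (depth - 1) _ (k + 1) (by omega) (by omega)
            · rw [if_neg h2, if_neg h2]
              by_cases h4 : ch = '"' ∨ ch = '\''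
              · rw [if_pos h4, if_pos h4]; exact ih g (some ch) depth _ (k + 1) (by omega) (by omega)
              · rw [if_neg h4, if_neg h4]
                by_cases h5 : ch = '\\' ∧ k + 1 < n
                · rw [if_pos h5, if_pos h5]; exact ih g none depth _ (k + 2) (by omega) (by omega)
                · rw [if_neg h5, if_neg h5]; exact ih g none depth _ (k + 1) (by omega) (by omega)
    · rw [if_neg hk, if_neg hk]

-- B's mask loop: peeling the accumulator
theorem pvBMask_acc (cs : List Char) (n : Int) :
    ∀ (f : Nat) (instr : Option Char) (depth : Int) (keep : List Bool) (k : Int),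
      pvBMask cs n f instr depth keep k
        = (keep ++ (pvBMask cs n f instr depth [] k).1, (pvBMask cs n f instr depth [] k).2) := by
  intro f
  induction f with
  | zero => intro instr depth keep k; simp [pvBMask]
  | succ f ih =>
    intro instr depth keep k
    rw [pvBMask]
    conv_rhs => rw [pvBMask]
    by_cases hk : k < n
    · rw [if_pos hk, if_pos hk]
      cases PySem.List.pyGet? cs k with
      | none => simp
      | some ch =>
        dsimp only
        cases instr with
        | some q =>
          dsimp only
          by_cases he : ch = '\\' ∧ k + 1 < n
          · rw [if_pos he, if_pos he, ih _ depth (keep ++ [false, false]) (k + 2),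
                ih _ depth ([] ++ [false, false]) (k + 2)]
            simp
          · rw [if_neg he, if_neg he, ih _ depth (keep ++ [false]) (k + 1),
                ih _ depth ([] ++ [false]) (k + 1)]
            simp
        | none =>
          dsimp only
          by_cases h1 : ch = '{'
          · rw [if_pos h1, if_pos h1, ih none (depth + 1) (keep ++ [true]) (k + 1),
                ih none (depth + 1) ([] ++ [true]) (k + 1)]
            simp
          · rw [if_neg h1, if_neg h1]
            by_cases h2 : ch = '}'
            · rw [if_pos h2, if_pos h2]
              by_cases h3 : depth - 1 = 0
              · rw [if_pos h3, if_pos h3]; simp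
              · rw [if_neg h3, if_neg h3, ih none (depth - 1) (keep ++ [true]) (k + 1),
                    ih none (depth - 1) ([] ++ [true]) (k + 1)]
                simp
            · rw [if_neg h2, if_neg h2]
              by_cases h4 : ch = '"' ∨ ch = '\''
              · rw [if_pos h4, if_pos h4, ih (some ch) depth (keep ++ [false]) (k + 1),
                    ih (some ch) depth ([] ++ [false]) (k + 1)]
                simp
              · rw [if_neg h4, if_neg h4]
                by_cases h5 : ch = '\\' ∧ k + 1 < n
                · rw [if_pos h5, if_pos h5, ih none depth (keep ++ [true, true]) (k + 2),
                      ih none depth ([] ++ [true, true]) (k + 2)]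
                  simp
                · rw [if_neg h5, if_neg h5, ih none depth (keep ++ [true]) (k + 1),
                      ih none depth ([] ++ [true]) (k + 1)]
                  simp
    · rw [if_neg hk, if_neg hk]; simp

-- B's mask loop: the mask grows by exactly one entry per consumed position
theorem pvBMask_len (cs : List Char) (n : Int) :
    ∀ (f : Nat) (instr : Option Char) (depth : Int) (k : Int),
      (pvBMask cs n f instr depth [] k).2
        = k + ((pvBMask cs n f instr depth [] k).1.length : Int) := by
  intro f
  induction f with
  | zero => intro instr depth k; simp [pvBMask]
  | succ f ih =>
    intro instr depth k
    rw [pvBMask]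
    by_cases hk : k < n
    · rw [if_pos hk]
      cases PySem.List.pyGet? cs k with
      | none => simp
      | some ch =>
        dsimp only
        cases instr with
        | some q =>
          dsimp only
          by_cases he : ch = '\\' ∧ k + 1 < n
          · rw [if_pos he, pvBMask_acc cs n f (some q) depth ([] ++ [false, false]) (k + 2)]
            have := ih (some q) depth (k + 2)
            simp at *
            omega
          · rw [if_neg he, pvBMask_acc cs n f (if ch = q then none else some q) depth ([] ++ [false]) (k + 1)]
            have := ih (if ch = q then none else some q) depth (k + 1)
            simp at *
            omega
        | none =>
          dsimp only
          by_cases h1 : ch = '{'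
          · rw [if_pos h1, pvBMask_acc cs n f none (depth + 1) ([] ++ [true]) (k + 1)]
            have := ih none (depth + 1) (k + 1)
            simp at *
            omega
          · rw [if_neg h1]
            by_cases h2 : ch = '}'
            · rw [if_pos h2]
              by_cases h3 : depth - 1 = 0
              · rw [if_pos h3]; simp
              · rw [if_neg h3, pvBMask_acc cs n f none (depth - 1) ([] ++ [true]) (k + 1)]
                have := ih none (depth - 1) (k + 1)
                simp at *
                omega
            · rw [if_neg h2]
              by_cases h4 : ch = '"' ∨ ch = '\''
              · rw [if_pos h4, pvBMask_acc cs n f (some ch) depth ([] ++ [false]) (k + 1)]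
                have := ih (some ch) depth (k + 1)
                simp at *
                omega
              · rw [if_neg h4]
                by_cases h5 : ch = '\\' ∧ k + 1 < n
                · rw [if_pos h5, pvBMask_acc cs n f none depth ([] ++ [true, true]) (k + 2)]
                  have := ih none depth (k + 2)
                  simp at *
                  omega
                · rw [if_neg h5, pvBMask_acc cs n f none depth ([] ++ [true]) (k + 1)]
                  have := ih none depth (k + 1)
                  simp at *
                  omega
    · rw [if_neg hk]; simp

-- B's loop in string state = all-false mask along A's inner loop, then B's loop in neutral state
theorem pvBMask_some (cs : List Char) (n : Int) (q : Char) (depth : Int) :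
    ∀ (f : Nat) (keep : List Bool) (k : Int), (n - k).toNat < f →
      pvBMask cs n f (some q) depth keep k
        = pvBMask cs n f none depth
            (keep ++ List.replicate (((pvAStr cs n q f [] k).2) - k).toNat false)
            ((pvAStr cs n q f [] k).2) := by
  intro f
  induction f with
  | zero => omega
  | succ f ih =>
    intro keep k hf
    by_cases hk : k < n
    · cases hg : PySem.List.pyGet? cs k with
      | none =>
        have hA : pvAStr cs n q (f + 1) [] k = ([], k) := by
          rw [pvAStr, if_pos hk, hg]
        rw [hA]
        conv_lhs => rw [pvBMask]
        conv_rhs => rw [pvBMask]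
        rw [if_pos hk, if_pos hk, hg]
        simp
      | some c =>
        by_cases he : c = '\\' ∧ k + 1 < n
        · have hA : pvAStr cs n q (f + 1) [] k
              = (["  "] ++ (pvAStr cs n q f [] (k + 2)).1, (pvAStr cs n q f [] (k + 2)).2) := by
            rw [pvAStr, if_pos hk, hg]
            dsimp only
            rw [if_pos he, pvAStr_acc cs n q f ([] ++ ["  "]) (k + 2)]
            simp
          rw [hA]
          conv_lhs => rw [pvBMask]
          rw [if_pos hk, hg]
          dsimp only
          rw [if_pos he, ih (keep ++ [false, false]) (k + 2) (by omega)]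
          have hle := pvAStr_le cs n q f [] (k + 2)
          have hn : ((pvAStr cs n q f [] (k + 2)).2 - k).toNat
              = ((pvAStr cs n q f [] (k + 2)).2 - (k + 2)).toNat + 2 := by omega
          rw [hn, pvRep_two, List.append_assoc]
          exact pvBMask_fuel cs n f (f + 1) none depth _ _ (by omega) (by omega)
        · by_cases hq : c = q
          · have hA : pvAStr cs n q (f + 1) [] k = ([" "], k + 1) := by
              rw [pvAStr, if_pos hk, hg]
              dsimp only
              rw [if_neg he, if_pos hq]
              simp
            rw [hA]
            conv_lhs => rw [pvBMask]
            rw [if_pos hk, hg]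
            dsimp only
            rw [if_neg he, if_pos hq]
            have hn : (k + 1 - k).toNat = 1 := by omega
            rw [hn]
            exact pvBMask_fuel cs n f (f + 1) none depth _ _ (by omega) (by omega)
          · have hA : pvAStr cs n q (f + 1) [] k
                = ([" "] ++ (pvAStr cs n q f [] (k + 1)).1, (pvAStr cs n q f [] (k + 1)).2) := by
              rw [pvAStr, if_pos hk, hg]
              dsimp only
              rw [if_neg he, if_neg hq, pvAStr_acc cs n q f ([] ++ [" "]) (k + 1)]
              simp
            rw [hA]
            conv_lhs => rw [pvBMask]
            rw [if_pos hk, hg]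
            dsimp only
            rw [if_neg he, if_neg hq]
            rw [ih (keep ++ [false]) (k + 1) (by omega)]
            have hle := pvAStr_le cs n q f [] (k + 1)
            have hn : ((pvAStr cs n q f [] (k + 1)).2 - k).toNat
                = ((pvAStr cs n q f [] (k + 1)).2 - (k + 1)).toNat + 1 := by omega
            rw [hn, List.replicate_succ, List.append_assoc]
            exact pvBMask_fuel cs n f (f + 1) none depth _ _ (by omega) (by omega)
    · have hA : pvAStr cs n q (f + 1) [] k = ([], k) := by
        rw [pvAStr, if_neg hk]
      rw [hA]
      conv_lhs => rw [pvBMask]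
      conv_rhs => rw [pvBMask]
      rw [if_neg hk, if_neg hk]
      simp

-- main loop equivalence at the character level (n is the real length, as at the call site)
theorem pvLoop_eq (cs : List Char) (n : Int) (hnn : n ≤ (cs.length : Int)) :
    ∀ (f : Nat) (depth : Int) (out : List String) (k : Int), (n - k).toNat < f → 0 < depth →
      pvJC (pvALoop cs n f depth out k).1
          = pvJC out ++ pvRen cs k (pvBMask cs n f none depth [] k).1
        ∧ (pvALoop cs n f depth out k).2 = (pvBMask cs n f none depth [] k).2 := by
  intro f
  induction f with
  | zero => omega
  | succ f ih =>
    intro depth out k hf hd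
    by_cases hk : k < n
    · cases hg : PySem.List.pyGet? cs k with
      | none =>
        have hB : pvBMask cs n (f + 1) none depth ([] : List Bool) k = ([], k) := by
          rw [pvBMask, if_pos hk, hg]
        rw [pvALoop, if_pos ⟨hk, hd⟩, hg, hB]
        simp [pvRen]
      | some ch =>
        by_cases h1 : ch = '{'
        · have hA : pvALoop cs n (f + 1) depth out k
              = pvALoop cs n f (depth + 1) (out ++ [String.ofList [ch]]) (k + 1) := by
            rw [pvALoop, if_pos ⟨hk, hd⟩, hg]
            dsimp only
            rw [if_pos h1]
          have hB : pvBMask cs n (f + 1) none depth ([] : List Bool) k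
              = ([true] ++ (pvBMask cs n f none (depth + 1) [] (k + 1)).1,
                 (pvBMask cs n f none (depth + 1) [] (k + 1)).2) := by
            rw [pvBMask, if_pos hk, hg]
            dsimp only
            rw [if_pos h1, pvBMask_acc cs n f none (depth + 1) ([] ++ [true]) (k + 1)]
            simp
          obtain ⟨ih1, ih2⟩ := ih (depth + 1) (out ++ [String.ofList [ch]]) (k + 1) (by omega) (by omega)
          rw [hA, hB]
          have hch := pvGetD_of_pyGet? cs k ch ' ' hg
          refine ⟨?_, ih2⟩
          rw [ih1, pvJC_append]
          simp [pvRen, pvJC, hch]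
        · by_cases h2 : ch = '}'
          · by_cases h3 : depth - 1 = 0
            · have hA : pvALoop cs n (f + 1) depth out k = (out ++ [" "], k + 1) := by
                rw [pvALoop, if_pos ⟨hk, hd⟩, hg]
                dsimp only
                rw [if_neg h1, if_pos h2, if_pos h3]
              have hB : pvBMask cs n (f + 1) none depth ([] : List Bool) k = ([false], k + 1) := by
                rw [pvBMask, if_pos hk, hg]
                dsimp only
                rw [if_neg h1, if_pos h2, if_pos h3]
                simp
              rw [hA, hB]
              refine ⟨?_, rfl⟩
              rw [pvJC_append]
              simp [pvRen, pvJC]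
            · have hA : pvALoop cs n (f + 1) depth out k
                  = pvALoop cs n f (depth - 1) (out ++ [String.ofList [ch]]) (k + 1) := by
                rw [pvALoop, if_pos ⟨hk, hd⟩, hg]
                dsimp only
                rw [if_neg h1, if_pos h2, if_neg h3]
              have hB : pvBMask cs n (f + 1) none depth ([] : List Bool) k
                  = ([true] ++ (pvBMask cs n f none (depth - 1) [] (k + 1)).1,
                     (pvBMask cs n f none (depth - 1) [] (k + 1)).2) := by
                rw [pvBMask, if_pos hk, hg]
                dsimp only
                rw [if_neg h1, if_pos h2, if_neg h3,
                    pvBMask_acc cs n f none (depth - 1) ([] ++ [true]) (k + 1)]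
                simp
              obtain ⟨ih1, ih2⟩ := ih (depth - 1) (out ++ [String.ofList [ch]]) (k + 1) (by omega) (by omega)
              rw [hA, hB]
              have hch := pvGetD_of_pyGet? cs k ch ' ' hg
              refine ⟨?_, ih2⟩
              rw [ih1, pvJC_append]
              simp [pvRen, pvJC, hch]
          · by_cases h4 : ch = '"' ∨ ch = '\''
            · -- nested string literal
              have hkI := pvAStr_le cs n ch f [] (k + 1)
              set kI := (pvAStr cs n ch f [] (k + 1)).2 with hkIdef
              have hA : pvALoop cs n (f + 1) depth out k
                  = pvALoop cs n f depth ((out ++ [" "]) ++ (pvAStr cs n ch f [] (k + 1)).1) kI := by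
                rw [pvALoop, if_pos ⟨hk, hd⟩, hg]
                dsimp only
                rw [if_neg h1, if_neg h2, if_pos h4]
                rw [pvAStr_acc cs n ch f (out ++ [" "]) (k + 1)]
              have hB : pvBMask cs n (f + 1) none depth ([] : List Bool) k
                  = (([false] ++ List.replicate (kI - (k + 1)).toNat false)
                       ++ (pvBMask cs n f none depth [] kI).1,
                     (pvBMask cs n f none depth [] kI).2) := by
                rw [pvBMask, if_pos hk, hg]
                dsimp only
                rw [if_neg h1, if_neg h2, if_pos h4,
                    pvBMask_some cs n ch depth f ([] ++ [false]) (k + 1) (by omega),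
                    pvBMask_acc cs n f none depth _ kI]
                simp
                rw [hkIdef]
              obtain ⟨ih1, ih2⟩ := ih depth ((out ++ [" "]) ++ (pvAStr cs n ch f [] (k + 1)).1) kI
                  (by omega) hd
              rw [hA, hB]
              refine ⟨?_, ih2⟩
              rw [ih1, pvJC_append, pvAStr_blanks cs n ch f [] (k + 1), pvRen_append]
              have hlen : (k : Int) + (([false] ++ List.replicate (kI - (k + 1)).toNat false).length : Int)
                  = kI := by
                simp
                omega
              rw [hlen]
              have hren : pvRen cs k ([false] ++ List.replicate (kI - (k + 1)).toNat false)
                  = ' ' :: List.replicate (kI - (k + 1)).toNat ' ' := by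
                have := pvRen_replicate_false cs ((kI - (k + 1)).toNat) (k + 1)
                simp [pvRen, this]
              rw [hren]
              simp [pvJC]
              rw [hkIdef]
            · by_cases h5 : ch = '\\' ∧ k + 1 < n
              · -- escape outside a literal: both keep the two characters
                have hrange : PySem.Raise.InRange cs.length k := by
                  by_contra hc
                  rw [← PySem.List.pyGet?_eq_none_iff] at hc
                  rw [hc] at hg
                  cases hg
                have hg2 : ∃ c2, PySem.List.pyGet? cs (k + 1) = some c2 := by
                  cases hg2 : PySem.List.pyGet? cs (k + 1) with
                  | none =>
                    rw [PySem.List.pyGet?_eq_none_iff] at hg2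
                    exfalso
                    apply hg2
                    simp only [PySem.Raise.InRange] at hrange ⊢
                    omega
                  | some c2 => exact ⟨c2, rfl⟩
                obtain ⟨c2, hg2⟩ := hg2
                have hA : pvALoop cs n (f + 1) depth out k
                    = pvALoop cs n f depth (out ++ [String.ofList [ch, c2]]) (k + 2) := by
                  rw [pvALoop, if_pos ⟨hk, hd⟩, hg]
                  dsimp only
                  rw [if_neg h1, if_neg h2, if_neg h4, if_pos h5, hg2]
                have hB : pvBMask cs n (f + 1) none depth ([] : List Bool) k
                    = ([true, true] ++ (pvBMask cs n f none depth [] (k + 2)).1,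
                       (pvBMask cs n f none depth [] (k + 2)).2) := by
                  rw [pvBMask, if_pos hk, hg]
                  dsimp only
                  rw [if_neg h1, if_neg h2, if_neg h4, if_pos h5,
                      pvBMask_acc cs n f none depth ([] ++ [true, true]) (k + 2)]
                  simp
                obtain ⟨ih1, ih2⟩ := ih depth (out ++ [String.ofList [ch, c2]]) (k + 2) (by omega) hd
                rw [hA, hB]
                have hch := pvGetD_of_pyGet? cs k ch ' ' hg
                have hc2 := pvGetD_of_pyGet? cs (k + 1) c2 ' ' hg2
                refine ⟨?_, ih2⟩
                rw [ih1, pvJC_append]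
                simp [pvRen, pvJC, hch, hc2]
                ring_nf
              · -- ordinary character
                have hA : pvALoop cs n (f + 1) depth out k
                    = pvALoop cs n f depth (out ++ [String.ofList [ch]]) (k + 1) := by
                  rw [pvALoop, if_pos ⟨hk, hd⟩, hg]
                  dsimp only
                  rw [if_neg h1, if_neg h2, if_neg h4, if_neg h5]
                have hB : pvBMask cs n (f + 1) none depth ([] : List Bool) k
                    = ([true] ++ (pvBMask cs n f none depth [] (k + 1)).1,
                       (pvBMask cs n f none depth [] (k + 1)).2) := by
                  rw [pvBMask, if_pos hk, hg]
                  dsimp only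
                  rw [if_neg h1, if_neg h2, if_neg h4, if_neg h5,
                      pvBMask_acc cs n f none depth ([] ++ [true]) (k + 1)]
                  simp
                obtain ⟨ih1, ih2⟩ := ih depth (out ++ [String.ofList [ch]]) (k + 1) (by omega) hd
                rw [hA, hB]
                have hch := pvGetD_of_pyGet? cs k ch ' ' hg
                refine ⟨?_, ih2⟩
                rw [ih1, pvJC_append]
                simp [pvRen, pvJC, hch]
    · have hB : pvBMask cs n (f + 1) none depth ([] : List Bool) k = ([], k) := by
        rw [pvBMask, if_neg hk]
      rw [pvALoop, if_neg (fun h => hk h.1), hB]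
      simp [pvRen]

-- pass 2 over the zipped range computes the renderer
theorem pvZip_ren (cs : List Char) : ∀ (m : List Bool) (a b : Int),
    b = a + (m.length : Int) →
    pvJC (List.zipWith
        (fun p f => if f then String.ofList [PySem.List.pyGetD cs p ' '] else " ")
        (PySem.List.pyRange a b 1) m)
      = pvRen cs a m := by
  intro m
  induction m with
  | nil => intro a b _; simp [pvRen, pvJC]
  | cons f m ih =>
    intro a b hb
    have hab : a < b := by simp at hb; omega
    rw [PySem.List.pyRange_one_cons hab]
    rw [List.zipWith_cons_cons]
    have ht : pvJC ((if f then String.ofList [PySem.List.pyGetD cs a ' '] else " ")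
        :: List.zipWith
          (fun p f => if f then String.ofList [PySem.List.pyGetD cs p ' '] else " ")
          (PySem.List.pyRange (a + 1) b 1) m)
        = (if f then PySem.List.pyGetD cs a ' ' else ' ')
          :: pvJC (List.zipWith
            (fun p f => if f then String.ofList [PySem.List.pyGetD cs p ' '] else " ")
            (PySem.List.pyRange (a + 1) b 1) m) := by
      cases f <;> simp [pvJC]
    rw [ht, ih (a + 1) b (by simp at hb ⊢; omega)]
    simp [pvRen]

-- ===== VERDICT (by name: the statement is the Claim_ definition above) =====
theorem consume_gstring_interpolation_py_spec : Claim_equal_consume_gstring_interpolation_py := by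
  intro text start _ _
  unfold Spec_consume_gstring_interpolation_py
  unfold consume_gstring_interpolation_py consume_gstring_interpolation_py_alt
  dsimp only
  set cs := text.toList with hcs
  set n : Int := (cs.length : Int) with hn
  set fuel : Nat := ((n - (start + 2)).toNat + 1) with hfuel
  obtain ⟨h1, h2⟩ := pvLoop_eq cs n (le_refl _) fuel 1 ["  "] (start + 2) (by omega) (by omega)
  rw [pvBMask_acc cs n fuel none 1 [false, false] (start + 2)]
  set M := (pvBMask cs n fuel none 1 [] (start + 2)).1 with hM
  set K := (pvBMask cs n fuel none 1 [] (start + 2)).2 with hK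
  have hKlen : K = (start + 2) + (M.length : Int) := pvBMask_len cs n fuel none 1 (start + 2)
  refine Prod.ext ?_ ?_
  · dsimp only
    apply String.toList_inj.mp
    rw [pvJoin_toList, pvJoin_toList, h1]
    rw [pvZip_ren cs ([false, false] ++ M) start K (by simp; omega)]
    simp [pvRen, pvJC]
    ring_nf
  · dsimp only
    rw [h2]
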